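-- pv_equiv track=rewrite | github.com/Chunhao-Li/Learning-Python | Course Learning/lab6/untitled0.py | make_list_of_lists
-- ===== SOURCE A (Python) =====
-- def make_list_of_lists(n):
--     the_list = []
--     sublist = []
--     while n > 0:
--         the_list.append(sublist[:])
--         sublist.append(len(sublist) + 1)
--         n = n - 1
--     return the_list
-- ===== SOURCE B (Python) =====
-- def make_list_of_lists(n):
--     nums = list(range(1, n + 1))
--     return [nums[:i] for i in range(n)]
-- ===== Notes on version B (the rewrite author's own statement) =====
-- stated objective: simpler
-- what changed: Replaces the maintained accumulator loop (growing a running sublist and slice-copying it each step) by a direct per-index construction: precompute nums = [1..n] once and return row i as the prefix slice nums[:i].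
import Mathlib
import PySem

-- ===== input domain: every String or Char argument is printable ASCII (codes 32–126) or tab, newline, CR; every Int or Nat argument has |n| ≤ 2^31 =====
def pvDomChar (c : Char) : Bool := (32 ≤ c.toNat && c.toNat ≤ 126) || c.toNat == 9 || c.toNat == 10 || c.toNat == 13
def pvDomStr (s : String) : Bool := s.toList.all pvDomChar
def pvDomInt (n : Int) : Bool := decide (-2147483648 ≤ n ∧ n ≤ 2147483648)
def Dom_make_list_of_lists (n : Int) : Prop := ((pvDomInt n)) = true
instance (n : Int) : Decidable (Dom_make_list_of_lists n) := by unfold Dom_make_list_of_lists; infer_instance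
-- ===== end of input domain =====

-- ===== PORT A =====
-- B replaces A's accumulator loop (slice-copying a growing sublist) by a direct per-index construction (objective: simpler).
def pvLoopA (n : Int) (theList : List (List Int)) (sublist : List Int) : List (List Int) :=
  if h : n > 0 then
    pvLoopA (n - 1) (theList ++ [sublist]) (sublist ++ [(sublist.length : Int) + 1])
  else theList
termination_by n.toNat
decreasing_by omega

def make_list_of_lists (n : Int) : List (List Int) :=
  pvLoopA n [] []

-- ===== PORT B =====
def make_list_of_lists_alt (n : Int) : List (List Int) :=
  let nums := PySem.List.pyRange 1 (n + 1) 1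
  (PySem.List.pyRange 0 n 1).map (fun i => PySem.List.slice nums none (some i))

-- ===== PRECONDITION & SPEC =====
def Spec_make_list_of_lists (n : Int) (out : List (List Int)) : Prop := out = make_list_of_lists_alt n
instance (n : Int) (out : List (List Int)) : Decidable (Spec_make_list_of_lists n out) := by unfold Spec_make_list_of_lists; infer_instance

-- ===== CLAIM (what is proved, stated in full; the proofs are below) =====
def Claim_equal_make_list_of_lists : Prop := ∀ (n : Int), Dom_make_list_of_lists n → Spec_make_list_of_lists n (make_list_of_lists n)

-- ===== LEMMAS AND PROOFS =====

lemma pvLoopA_spec : ∀ (m : Nat) (n : Int), n.toNat = m → ∀ (acc : List (List Int)) (sub : List Int),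
    pvLoopA n acc sub =
      acc ++ (List.range m).map (fun i => sub ++ (List.range i).map (fun (j : Nat) => ((sub.length : Int) + (j : Int) + 1))) := by
  intro m
  induction m with
  | zero =>
    intro n hn acc sub
    rw [pvLoopA]
    have : ¬ n > 0 := by omega
    simp [this]
  | succ m ih =>
    intro n hn acc sub
    have hpos : n > 0 := by omega
    rw [pvLoopA]
    simp only [hpos, dif_pos]
    rw [ih (n - 1) (by omega)]
    rw [List.range_succ_eq_map, List.map_cons, List.map_map]
    simp only [List.range_zero, List.map_nil, List.append_nil, List.append_assoc,
      List.singleton_append, List.cons_append, List.nil_append]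
    congr 1
    congr 1
    apply List.map_congr_left
    intro i _
    simp only [Function.comp_apply, Nat.succ_eq_add_one]
    rw [List.range_succ_eq_map, List.map_cons, List.map_map]
    simp only [List.length_append, List.length_cons, List.length_nil, List.append_assoc,
      List.cons_append, List.nil_append, Function.comp]
    apply congrArg (sub ++ ·)
    refine List.cons_eq_cons.mpr ⟨by push_cast; ring, ?_⟩
    apply List.map_congr_left
    intro j _
    simp only [Function.comp_apply, Nat.succ_eq_add_one]
    push_cast; ring

-- ===== VERDICT (by name: the statement is the Claim_ definition above) =====
theorem make_list_of_lists_spec : Claim_equal_make_list_of_lists := by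
  intro n _
  unfold Spec_make_list_of_lists make_list_of_lists make_list_of_lists_alt
  rw [pvLoopA_spec n.toNat n rfl]
  rw [PySem.List.pyRange_one 0 n]
  simp only [Int.sub_zero, List.map_map, List.nil_append]
  apply List.map_congr_left
  intro k hk
  have hkn : k < n.toNat := List.mem_range.mp hk
  show _ = PySem.List.slice (PySem.List.pyRange 1 (n + 1) 1) none (some (0 + (k : Int)))
  rw [zero_add, PySem.List.slice_to_natCast, PySem.List.pyRange_one]
  rw [← List.map_take, List.take_range]
  have hmin : min k (n + 1 - 1).toNat = k := by omega
  rw [hmin]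
  simp only [List.length_nil, Int.natCast_zero]
  apply List.map_congr_left
  intro j _
  ring
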